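-- pv_equiv track=rewrite | github.com/evialbert/LeetCode | 4144-minimum-cost-to-merge-sorted-lists/minimum-cost-to-merge-sorted-lists.py | minMergeCost
-- ===== SOURCE A (Python) =====
-- from typing import List
--
-- def minMergeCost(lists: List[List[int]]) -> int:
--     n = len(lists)
--     full_mask = (1 << n) - 1
--
--     length = [0] * (1 << n)
--     med = [0] * (1 << n)
--
--     for mask in range(1, 1 << n):
--         elements = []
--         for i in range(n):
--             if mask & (1 << i):
--                 elements.extend(lists[i])
--         elements.sort()
--         length[mask] = len(elements)
--         med[mask] = elements[(len(elements) - 1) // 2]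
--
--     dp = [0] * (1 << n)
--
--     for mask in range(1, 1 << n):
--         if mask & (mask - 1) == 0:
--             dp[mask] = 0
--             continue
--
--         best = float('inf')
--
--         submask = (mask - 1) & mask
--         while submask > 0:
--             other = mask ^ submask
--             if submask < other:
--                 cost = dp[submask] + dp[other] + length[submask] + length[other] + abs(med[submask] - med[other])
--                 best = min(best, cost)
--             submask = (submask - 1) & mask
--
--         dp[mask] = best
--
--     return dp[full_mask]
-- ===== SOURCE B (Python) =====
-- def minMergeCost(lists):
--     n = len(lists)
--     full = (1 << n) - 1
--
--     stats = {}
--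
--     def stat(mask):
--         r = stats.get(mask)
--         if r is None:
--             elems = sorted(x for i in range(n) if mask >> i & 1 for x in lists[i])
--             r = stats[mask] = (len(elems), elems[(len(elems) - 1) // 2])
--         return r
--
--     memo = {}
--
--     def solve(mask):
--         if mask & (mask - 1) == 0:
--             return 0
--         r = memo.get(mask)
--         if r is None:
--             subs = [0]
--             for i in range(n):
--                 if mask >> i & 1:
--                     b = 1 << i
--                     subs += [s | b for s in subs]
--             best = None
--             for sub in subs:
--                 other = mask ^ sub
--                 if sub == 0 or other <= sub:
--                     continue
--                 ls, ms = stat(sub)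
--                 lo, mo = stat(other)
--                 c = solve(sub) + solve(other) + ls + lo + abs(ms - mo)
--                 if best is None or c < best:
--                     best = c
--             r = memo[mask] = best
--         return r
--
--     return solve(full)
-- ===== Notes on version B (the rewrite author's own statement) =====
-- stated objective: alternative
-- what changed: Replaced the bottom-up DP over precomputed length/median tables with its (sub-1)&mask submask walk by a top-down memoized recursion that computes each mask's length/median lazily and enumerates submasks by subset doubling over the mask's bits.
import Mathlib
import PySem

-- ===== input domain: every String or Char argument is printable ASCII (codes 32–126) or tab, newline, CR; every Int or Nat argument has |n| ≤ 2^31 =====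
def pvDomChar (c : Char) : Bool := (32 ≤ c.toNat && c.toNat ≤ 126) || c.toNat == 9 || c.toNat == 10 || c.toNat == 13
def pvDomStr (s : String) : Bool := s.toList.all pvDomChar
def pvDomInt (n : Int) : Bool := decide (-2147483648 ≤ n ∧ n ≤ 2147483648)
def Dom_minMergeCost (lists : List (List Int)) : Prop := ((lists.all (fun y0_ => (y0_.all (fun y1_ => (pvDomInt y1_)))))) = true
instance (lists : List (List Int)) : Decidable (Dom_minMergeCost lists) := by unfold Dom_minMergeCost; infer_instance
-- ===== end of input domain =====

-- B replaces A's bottom-up table DP (precomputed length/median arrays, (sub-1)&mask submask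
-- walk) with a top-down memoized recursion that computes each mask's length/median lazily and
-- enumerates submasks by subset doubling over the mask's bits; an alternative decomposition,
-- not claimed faster.

-- ===== PORT A =====
-- 'for i in range(n): if mask & (1 << i): elements.extend(lists[i])' (i always in range, so getD is exact)
def pvElemsA (lists : List (List Int)) (n mask : Nat) : List Int :=
  (List.range n).foldl (fun acc i => if mask &&& (1 <<< i) ≠ 0 then acc ++ lists.getD i [] else acc) []

-- 'for mask in range(1, 1 << n): … length[mask] = …; med[mask] = elements[(len-1)//2]'.
-- elements is nonempty for every mask ≥ 1 under Pre_ (IndexError otherwise), so getD 0 is exact there.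
def pvFillA (lists : List (List Int)) (n size : Nat) (mask : Nat) (len med : List Int) :
    List Int × List Int :=
  if _h : mask < size then
    let es := PySem.List.sorted (pvElemsA lists n mask) (fun x => x) false
    pvFillA lists n size (mask+1) (len.set mask (es.length : Int))
      (med.set mask (es.getD ((es.length - 1)/2) 0))
  else (len, med)
termination_by size - mask

-- the inner 'while submask > 0' loop; best : Option Int models float('inf') as none
def pvInnerA (dp len med : List Int) (mask : Nat) (submask : Nat) (best : Option Int) : Option Int :=
  if _h : submask = 0 then best
  else
    let other := mask ^^^ submask
    let best' :=
      if submask < other then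
        let cost := dp.getD submask 0 + dp.getD other 0 + len.getD submask 0 + len.getD other 0 +
          |med.getD submask 0 - med.getD other 0|
        some (match best with | none => cost | some b => min b cost)
      else best
    pvInnerA dp len med mask ((submask - 1) &&& mask) best'
termination_by submask
decreasing_by exact lt_of_le_of_lt Nat.and_le_left (by omega)

-- the dp loop; for a mask with ≥ 2 bits the while loop always meets a pair submask < other,
-- so best is never the initial float('inf'): getD 0 is the total stand-in for that unreachable none
def pvDpA (len med : List Int) (dp : List Int) (mask size : Nat) : List Int :=
  if _h : mask < size then
    if mask &&& (mask - 1) = 0 then pvDpA len med (dp.set mask 0) (mask+1) size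
    else
      let best := pvInnerA dp len med mask ((mask - 1) &&& mask) none
      pvDpA len med (dp.set mask (best.getD 0)) (mask+1) size
  else dp
termination_by size - mask

def minMergeCost (lists : List (List Int)) : Int :=
  let n := lists.length
  let size := 1 <<< n
  let full := size - 1
  let t := pvFillA lists n size 1 (List.replicate size 0) (List.replicate size 0)
  let dp := pvDpA t.1 t.2 (List.replicate size 0) 1 size
  dp.getD full 0

-- ===== PORT B =====
-- stat(mask): sorted merge of the selected rows, its length and lower median (nonempty under Pre_)
def pvStatB (lists : List (List Int)) (n mask : Nat) : Int × Int :=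
  let elems := PySem.List.sorted
    (((List.range n).filter (fun i => (mask >>> i) &&& 1 = 1)).flatMap (fun i => lists.getD i []))
    (fun x => x) false
  ((elems.length : Int), elems.getD ((elems.length - 1)/2) 0)

-- solve(mask): the Python memo/stats dicts are pure caches and change no value; the fuel
-- argument (≥ mask at every call, so the base 0-fuel case is never the answer) realises the
-- recursion structurally. subs is the subset-doubling list of all submasks of mask;
-- 'best is None or c < best' is the none/min update; getD 0 stands for the unreachable None
-- result of a mask with ≥ 2 bits.
def pvSubsB (n mask : Nat) : List Nat :=
  (List.range n).foldl (fun subs i =>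
    if (mask >>> i) &&& 1 = 1 then subs ++ subs.map (fun s => s ||| (1 <<< i)) else subs) [0]

def pvSolveB (lists : List (List Int)) (n : Nat) : Nat → Nat → Int
  | 0, _ => 0
  | f+1, mask =>
    if mask &&& (mask - 1) = 0 then 0
    else
      let best := (pvSubsB n mask).foldl (fun (best : Option Int) sub =>
        let other := mask ^^^ sub
        if sub = 0 ∨ other ≤ sub then best
        else
          let s1 := pvStatB lists n sub
          let s2 := pvStatB lists n other
          let c := pvSolveB lists n f sub + pvSolveB lists n f other + s1.1 + s2.1 + |s1.2 - s2.2|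
          some (match best with | none => c | some b => if c < b then c else b)) none
      best.getD 0

def minMergeCost_alt (lists : List (List Int)) : Int :=
  let n := lists.length
  let full := (1 <<< n) - 1
  pvSolveB lists n full full

-- ===== PRECONDITION & SPEC =====
-- Pre_ excludes exactly the inputs with an empty member list: there the Python A (and B alike)
-- raises IndexError taking the median of the empty single-list subset.
def Pre_minMergeCost (lists : List (List Int)) : Prop := ∀ l ∈ lists, l ≠ []
instance (lists : List (List Int)) : Decidable (Pre_minMergeCost lists) := by
  unfold Pre_minMergeCost; infer_instance

def pvWitness_minMergeCost : List (List Int) := [[3, 1], [2]]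

def Spec_minMergeCost (lists : List (List Int)) (out : Int) : Prop := out = minMergeCost_alt lists
instance (lists : List (List Int)) (out : Int) : Decidable (Spec_minMergeCost lists out) := by
  unfold Spec_minMergeCost; infer_instance

-- ===== CLAIM (what is proved, stated in full; the proofs are below) =====
def Claim_equal_minMergeCost : Prop := ∀ (lists : List (List Int)), Dom_minMergeCost lists →
  Pre_minMergeCost lists → Spec_minMergeCost lists (minMergeCost lists)

-- ===== LEMMAS AND PROOFS =====

-- ---- bit-level toolkit ----
theorem pv_bitA (m i : Nat) : (m &&& (1 <<< i) ≠ 0) ↔ m.testBit i := by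
  simp [Nat.one_shiftLeft, Nat.and_two_pow]

theorem pv_bitB (m i : Nat) : ((m >>> i) &&& 1 = 1) ↔ m.testBit i := by
  simp [Nat.testBit, Nat.and_one_is_mod]

theorem pv_sub_half {s m : Nat} (h : s &&& m = s) : (s/2) &&& (m/2) = s/2 := by
  rw [← Nat.and_div_two, h]

theorem pv_sub_parity {s m : Nat} (h : s &&& m = s) : s % 2 ≤ m % 2 := by
  have h2 : (s &&& m) % 2 = s % 2 := by rw [h]
  rcases Nat.mod_two_eq_zero_or_one s with hs | hs
  · omega
  · have := (Nat.and_mod_two_eq_one (a := s) (b := m)).1 (by omega)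
    omega

-- the predecessor submask (s-1)&&&m dominates every submask below s
theorem pv_K : ∀ (s m t : Nat), s &&& m = s → t &&& m = t → t < s → t ≤ (s - 1) &&& m := by
  intro s
  induction s using Nat.strong_induction_on with
  | _ s ih =>
    intro m t hs ht hlt
    have ha : (s/2) &&& (m/2) = s/2 := pv_sub_half hs
    have hc : (t/2) &&& (m/2) = t/2 := pv_sub_half ht
    have hsp : s % 2 ≤ m % 2 := pv_sub_parity hs
    have htp : t % 2 ≤ m % 2 := pv_sub_parity ht
    have hds := Nat.div_add_mod s 2
    have hdt := Nat.div_add_mod t 2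
    rcases Nat.mod_two_eq_zero_or_one s with hs2 | hs2
    · -- s even, s > 0
      have ha0 : 0 < s / 2 := by omega
      have hca : t / 2 < s / 2 := by omega
      have hIH : t / 2 ≤ (s/2 - 1) &&& (m/2) := ih (s/2) (by omega) (m/2) (t/2) ha hc hca
      have hu2 : ((s-1) &&& m) / 2 = (s/2 - 1) &&& (m/2) := by
        rw [Nat.and_div_two]; congr 1; omega
      have hu1 : ((s-1) &&& m) % 2 = m % 2 := by
        have h1 : (s-1) % 2 = 1 := by omega
        rcases Nat.mod_two_eq_zero_or_one ((s-1) &&& m) with hu | hu <;>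
          rcases Nat.mod_two_eq_zero_or_one m with hm | hm
        · omega
        · exfalso; have := (Nat.and_mod_two_eq_one (a := s-1) (b := m)).2 ⟨h1, hm⟩; omega
        · exfalso; have := (Nat.and_mod_two_eq_one (a := s-1) (b := m)).1 hu; omega
        · omega
      have := Nat.div_add_mod ((s-1) &&& m) 2
      omega
    · -- s odd: (s-1) &&& m = s - 1
      have he1 : ((2 * (s/2)) &&& m) / 2 = s / 2 := by
        rw [Nat.and_div_two]
        have : 2 * (s/2) / 2 = s / 2 := by omega
        rw [this, ha]
      have he2 : ((2 * (s/2)) &&& m) % 2 = 0 := by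
        rcases Nat.mod_two_eq_zero_or_one ((2 * (s/2)) &&& m) with h0 | h1
        · exact h0
        · exfalso
          have := (Nat.and_mod_two_eq_one (a := 2 * (s/2)) (b := m)).1 h1
          omega
      have := Nat.div_add_mod ((2 * (s/2)) &&& m) 2
      have hse : s - 1 = 2 * (s/2) := by omega
      rw [hse]
      omega

theorem pv_xor_le : ∀ (m t : Nat), t &&& m = t → m ^^^ t ≤ m := by
  intro m
  induction m using Nat.strong_induction_on with
  | _ m ih =>
    intro t ht
    rcases Nat.eq_zero_or_pos m with hm | hm
    · subst hm
      have : t = 0 := by rw [← ht]; simp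
      simp [this]
    · have hc : (t/2) &&& (m/2) = t/2 := pv_sub_half ht
      have htp : t % 2 ≤ m % 2 := pv_sub_parity ht
      have hIH : (m/2) ^^^ (t/2) ≤ m/2 := ih (m/2) (by omega) (t/2) hc
      have hx2 : (m ^^^ t) / 2 = (m/2) ^^^ (t/2) := Nat.xor_div_two
      have hx1 : (m ^^^ t) % 2 ≤ m % 2 := by
        rcases Nat.mod_two_eq_zero_or_one (m ^^^ t) with h0 | h1
        · omega
        · have := (Nat.xor_mod_two_eq_one (a := m) (b := t)).1 h1
          omega
      have := Nat.div_add_mod (m ^^^ t) 2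
      have := Nat.div_add_mod m 2
      omega

theorem pv_xor_xor (m t : Nat) : m ^^^ (m ^^^ t) = t := by
  rw [← Nat.xor_assoc, Nat.xor_self, Nat.zero_xor]

theorem pv_xor_lt {m t : Nat} (h : t &&& m = t) (ht : 0 < t) : m ^^^ t < m := by
  have hle := pv_xor_le m t h
  rcases lt_or_eq_of_le hle with h' | h'
  · exact h'
  · exfalso
    have hxx := pv_xor_xor m t
    rw [h'] at hxx
    rw [Nat.xor_self] at hxx
    omega

theorem pv_other_submask {m t : Nat} (h : t &&& m = t) : (m ^^^ t) &&& m = m ^^^ t := by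
  apply Nat.eq_of_testBit_eq; intro i
  have hb : (t.testBit i && m.testBit i) = t.testBit i := by rw [← Nat.testBit_and, h]
  simp only [Nat.testBit_and, Nat.testBit_xor]
  revert hb; cases t.testBit i <;> cases m.testBit i <;> decide

theorem pv_disj {m t : Nat} (h : t &&& m = t) : t &&& (m ^^^ t) = 0 := by
  apply Nat.eq_of_testBit_eq; intro i
  have hb : (t.testBit i && m.testBit i) = t.testBit i := by rw [← Nat.testBit_and, h]
  simp only [Nat.testBit_and, Nat.testBit_xor, Nat.zero_testBit]
  revert hb; cases t.testBit i <;> cases m.testBit i <;> decide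

theorem pv_ne_other {m t : Nat} (h : t &&& m = t) (ht : 0 < t) : t ≠ m ^^^ t := by
  intro he
  have hd := pv_disj h
  rw [← he, Nat.and_self] at hd
  omega

theorem pv_other_pos {m t : Nat} (hlt : t < m) : 0 < m ^^^ t := by
  rcases Nat.eq_zero_or_pos (m ^^^ t) with h0 | h0
  · exfalso
    have hmt := pv_xor_xor m t
    rw [h0, Nat.xor_zero] at hmt
    omega
  · exact h0

theorem pv_submask_submask {x m : Nat} : (x &&& m) &&& m = x &&& m := by
  rw [Nat.and_assoc, Nat.and_self]

-- ---- A's submask enumeration sequence ----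
def pvSeq (m s : Nat) : List Nat :=
  if _h : s = 0 then [] else s :: pvSeq m ((s - 1) &&& m)
termination_by s
decreasing_by exact lt_of_le_of_lt Nat.and_le_left (by omega)

theorem pvSeq_zero (m : Nat) : pvSeq m 0 = [] := by rw [pvSeq]; simp

theorem pvSeq_pos {m s : Nat} (h : s ≠ 0) : pvSeq m s = s :: pvSeq m ((s - 1) &&& m) := by
  rw [pvSeq]; simp [h]

theorem pvSeq_sound : ∀ (s : Nat) {m : Nat}, s &&& m = s →
    ∀ t ∈ pvSeq m s, t &&& m = t ∧ 0 < t ∧ t ≤ s := by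
  intro s
  induction s using Nat.strong_induction_on with
  | _ s ih =>
    intro m hs t htm
    by_cases h0 : s = 0
    · subst h0; rw [pvSeq_zero] at htm; simp at htm
    · rw [pvSeq_pos h0] at htm
      rcases List.mem_cons.1 htm with h | h
      · subst h; exact ⟨hs, by omega, le_refl _⟩
      · have hlt : (s - 1) &&& m < s := lt_of_le_of_lt Nat.and_le_left (by omega)
        obtain ⟨h1, h2, h3⟩ := ih _ hlt pv_submask_submask t h
        exact ⟨h1, h2, by omega⟩

theorem pvSeq_complete : ∀ (s : Nat) {m t : Nat}, s &&& m = s → t &&& m = t → 0 < t → t ≤ s →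
    t ∈ pvSeq m s := by
  intro s
  induction s using Nat.strong_induction_on with
  | _ s ih =>
    intro m t hs ht ht0 hts
    have h0 : s ≠ 0 := by omega
    rw [pvSeq_pos h0]
    rcases eq_or_lt_of_le hts with he | hlt
    · exact he ▸ List.mem_cons_self ..
    · have hK : t ≤ (s - 1) &&& m := pv_K s m t hs ht hlt
      have hlt' : (s - 1) &&& m < s := lt_of_le_of_lt Nat.and_le_left (by omega)
      exact List.mem_cons_of_mem _ (ih _ hlt' pv_submask_submask ht ht0 hK)

-- ---- the running-minimum fold ----
def pvOmin (b : Option Int) (c : Int) : Option Int :=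
  some (match b with | none => c | some v => min v c)

theorem pv_foldl_min_le_init (xs : List Int) : ∀ x : Int, xs.foldl min x ≤ x := by
  induction xs with
  | nil => intro x; simp
  | cons y ys ih => intro x; exact le_trans (ih _) (min_le_left _ _)

theorem pv_foldl_min_le_mem (xs : List Int) : ∀ (x : Int), ∀ y ∈ xs, xs.foldl min x ≤ y := by
  induction xs with
  | nil => intro x y hy; simp at hy
  | cons z zs ih =>
    intro x y hy
    rcases List.mem_cons.1 hy with h | h
    · subst h
      rw [List.foldl_cons]
      exact le_trans (pv_foldl_min_le_init _ _) (min_le_right _ _)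
    · exact ih _ _ h

theorem pv_foldl_min_mem (xs : List Int) : ∀ x : Int, xs.foldl min x = x ∨ xs.foldl min x ∈ xs := by
  induction xs with
  | nil => intro x; simp
  | cons z zs ih =>
    intro x
    rcases ih (min x z) with h | h
    · rcases min_cases x z with ⟨he, _⟩ | ⟨he, _⟩
      · left; rw [List.foldl_cons, h, he]
      · right; rw [List.foldl_cons, h, he]; exact List.mem_cons_self ..
    · right; exact List.mem_cons_of_mem _ h

theorem pv_foldl_omin_some (xs : List Int) : ∀ b : Int,
    xs.foldl pvOmin (some b) = some (xs.foldl min b) := by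
  induction xs with
  | nil => intro b; rfl
  | cons y ys ih => intro b; simpa [pvOmin] using ih (min b y)

theorem pv_foldl_omin_spec (l : List Int) (h : l ≠ []) :
    ∃ v, l.foldl pvOmin none = some v ∧ v ∈ l ∧ ∀ x ∈ l, v ≤ x := by
  rcases l with _ | ⟨x, xs⟩
  · simp at h
  · refine ⟨xs.foldl min x, ?_, ?_, ?_⟩
    · rw [List.foldl_cons]
      exact pv_foldl_omin_some xs x
    · rcases pv_foldl_min_mem xs x with h1 | h1
      · rw [h1]; exact List.mem_cons_self ..
      · exact List.mem_cons_of_mem _ h1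
    · intro y hy
      rcases List.mem_cons.1 hy with h1 | h1
      · subst h1; exact pv_foldl_min_le_init xs y
      · exact pv_foldl_min_le_mem xs x y h1

-- two nonempty index lists with cost-preserving maps into each other have the same minimum
theorem pv_omin_eq (C : Nat → Int) (LA LB : List Nat) (hA : LA ≠ []) (hB : LB ≠ [])
    (h1 : ∀ t ∈ LA, ∃ u ∈ LB, C u = C t) (h2 : ∀ t ∈ LB, ∃ u ∈ LA, C u = C t) :
    (LA.map C).foldl pvOmin none = (LB.map C).foldl pvOmin none := by
  have hA' : LA.map C ≠ [] := by simpa using hA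
  have hB' : LB.map C ≠ [] := by simpa using hB
  obtain ⟨vA, eA, mA, bA⟩ := pv_foldl_omin_spec _ hA'
  obtain ⟨vB, eB, mB, bB⟩ := pv_foldl_omin_spec _ hB'
  rw [eA, eB]
  obtain ⟨t, htA, hCt⟩ := List.mem_map.1 mA
  obtain ⟨u, huB, hCu⟩ := h1 t htA
  obtain ⟨t', ht'B, hCt'⟩ := List.mem_map.1 mB
  obtain ⟨u', hu'A, hCu'⟩ := h2 t' ht'B
  have hBA : vB ≤ vA := by
    have := bB (C u) (List.mem_map.2 ⟨u, huB, rfl⟩)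
    rw [hCu, hCt] at this; exact this
  have hAB : vA ≤ vB := by
    have := bA (C u') (List.mem_map.2 ⟨u', hu'A, rfl⟩)
    rw [hCu', hCt'] at this; exact this
  exact congrArg some (le_antisymm hAB hBA)

-- ---- characterising the two inner loops ----
theorem pv_omin_alt (b : Option Int) (c : Int) :
    (some (match b with | none => c | some v => if c < v then c else v) : Option Int) =
      pvOmin b c := by
  cases b with
  | none => rfl
  | some v => simp only [pvOmin, min_def]; split_ifs <;> first | rfl | omega

theorem pv_fold_guard {α : Type} (l : List α) (p : α → Bool) (c : α → Int) :
    l.foldl (fun b t => if p t then pvOmin b (c t) else b) none =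
      ((l.filter p).map c).foldl pvOmin none := by
  rw [List.foldl_map, List.foldl_filter]

theorem pv_flatMap_guard (l : List Nat) (p : Nat → Prop) [DecidablePred p] (g : Nat → List Int) :
    l.flatMap (fun i => if p i then g i else []) = (l.filter (fun i => decide (p i))).flatMap g := by
  induction l with
  | nil => rfl
  | cons x xs ih =>
    by_cases h : p x <;> simp [h, ih]

theorem pvInnerA_eq (dp len med : List Int) (mask : Nat) : ∀ (s : Nat) (best : Option Int),
    pvInnerA dp len med mask s best =
      (((pvSeq mask s).filter (fun t => decide (t < mask ^^^ t))).map (fun t =>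
        dp.getD t 0 + dp.getD (mask ^^^ t) 0 + len.getD t 0 + len.getD (mask ^^^ t) 0 +
          |med.getD t 0 - med.getD (mask ^^^ t) 0|)).foldl pvOmin best := by
  intro s
  induction s using Nat.strong_induction_on with
  | _ s ih =>
    intro best
    by_cases h0 : s = 0
    · subst h0; rw [pvInnerA, pvSeq_zero]; simp
    · rw [pvInnerA, pvSeq_pos h0]
      have hlt : (s - 1) &&& mask < s := lt_of_le_of_lt Nat.and_le_left (by omega)
      simp only [h0, dif_neg, not_false_iff]
      rw [ih _ hlt]
      by_cases hc : s < mask ^^^ s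
      · rw [List.filter_cons_of_pos (by simpa using hc), List.map_cons, List.foldl_cons, if_pos hc]
        rfl
      · rw [List.filter_cons_of_neg (by simpa using hc), if_neg hc]

theorem pvSolveB_succ_eq (lists : List (List Int)) (n : Nat) (f mask : Nat) :
    pvSolveB lists n (f+1) mask =
      if mask &&& (mask - 1) = 0 then 0
      else ((((pvSubsB n mask).filter
          (fun t => decide ¬(t = 0 ∨ mask ^^^ t ≤ t))).map (fun t =>
        pvSolveB lists n f t + pvSolveB lists n f (mask ^^^ t) + (pvStatB lists n t).1 +
          (pvStatB lists n (mask ^^^ t)).1 +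
          |(pvStatB lists n t).2 - (pvStatB lists n (mask ^^^ t)).2|)).foldl pvOmin none).getD 0 := by
  conv_lhs => rw [pvSolveB]
  by_cases hb : mask &&& (mask - 1) = 0
  · simp [hb]
  · rw [if_neg hb, if_neg hb]
    show (List.foldl _ none (pvSubsB n mask)).getD 0 = _
    congr 1
    rw [← pv_fold_guard (pvSubsB n mask) (fun t => decide ¬(t = 0 ∨ mask ^^^ t ≤ t))]
    apply PySem.List.foldl_congr_mem
    intro acc x _
    by_cases hg : x = 0 ∨ mask ^^^ x ≤ x
    · simp [hg]
    · simp only [hg, if_neg, not_false_iff]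
      exact pv_omin_alt acc _

-- ---- elements / stats agree ----
theorem pv_elems_eq (lists : List (List Int)) (n mask : Nat) :
    pvElemsA lists n mask =
      ((List.range n).filter (fun i => (mask >>> i) &&& 1 = 1)).flatMap (fun i => lists.getD i []) := by
  unfold pvElemsA
  have h1 : ∀ (acc : List Int), ∀ i ∈ List.range n,
      (if mask &&& (1 <<< i) ≠ 0 then acc ++ lists.getD i [] else acc) =
        acc ++ (if (mask >>> i) &&& 1 = 1 then lists.getD i [] else []) := by
    intro acc i _
    by_cases h : mask.testBit i
    · rw [if_pos ((pv_bitA mask i).2 h), if_pos ((pv_bitB mask i).2 h)]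
    · rw [if_neg (fun hc => h ((pv_bitA mask i).1 hc)),
        if_neg (fun hc => h ((pv_bitB mask i).1 hc)), List.append_nil]
  rw [PySem.List.foldl_congr_mem _ _ _ _ h1, PySem.List.foldl_append_eq_flatMap]
  rw [List.nil_append]
  exact pv_flatMap_guard _ _ _

-- ---- the subset-doubling list contains exactly the submasks ----
theorem pv_sub_testBit {t m : Nat} (h : t &&& m = t) (i : Nat) (hb : t.testBit i = true) :
    m.testBit i = true := by
  have h2 := congrArg (fun x => Nat.testBit x i) h
  simp only [Nat.testBit_and] at h2
  rw [hb] at h2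
  simpa using h2

theorem pv_sub_trans {a b c : Nat} (h1 : a &&& b = a) (h2 : b &&& c = b) : a &&& c = a := by
  apply Nat.eq_of_testBit_eq
  intro i
  simp only [Nat.testBit_and]
  by_cases ha : a.testBit i
  · rw [ha, pv_sub_testBit h2 i (pv_sub_testBit h1 i ha), Bool.and_true]
  · simp [ha]

theorem pvSubsB_mem_aux (mask : Nat) : ∀ (i t : Nat),
    (t ∈ (List.range i).foldl (fun subs j =>
      if (mask >>> j) &&& 1 = 1 then subs ++ subs.map (fun s => s ||| (1 <<< j)) else subs) [0]) ↔
    (t &&& mask = t ∧ t < 2 ^ i) := by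
  intro i
  induction i with
  | zero =>
    intro t
    simp only [List.range_zero, List.foldl_nil, List.mem_singleton, pow_zero, Nat.lt_one_iff]
    constructor
    · rintro rfl; exact ⟨Nat.zero_and mask, rfl⟩
    · rintro ⟨_, h⟩; exact h
  | succ i ih =>
    intro t
    rw [List.range_succ, List.foldl_append, List.foldl_cons, List.foldl_nil]
    by_cases hbit : (mask >>> i) &&& 1 = 1
    · rw [if_pos hbit]
      have hmb : mask.testBit i = true := (pv_bitB mask i).1 hbit
      rw [List.mem_append, List.mem_map]
      constructor
      · rintro (h | ⟨v, hv, rfl⟩)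
        · obtain ⟨h1, h2⟩ := (ih t).1 h
          exact ⟨h1, lt_trans h2 (Nat.pow_lt_pow_succ (by omega))⟩
        · obtain ⟨h1, h2⟩ := (ih v).1 hv
          rw [Nat.one_shiftLeft]
          constructor
          · apply Nat.eq_of_testBit_eq
            intro j
            have hsj := congrArg (fun x => Nat.testBit x j) h1
            simp only [Nat.testBit_and] at hsj
            simp only [Nat.testBit_and, Nat.testBit_or, Nat.testBit_two_pow]
            by_cases hij : i = j
            · subst hij; simp [hmb]
            · simp [hij, hsj]
          · exact Nat.or_lt_two_pow (lt_trans h2 (Nat.pow_lt_pow_succ (by omega)))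
              (Nat.pow_lt_pow_succ (by omega))
      · rintro ⟨h1, h2⟩
        by_cases hti : t.testBit i = true
        · right
          have hpt : (2 ^ i) &&& t = 2 ^ i := by
            apply Nat.eq_of_testBit_eq
            intro j
            simp only [Nat.testBit_and, Nat.testBit_two_pow]
            by_cases hij : i = j
            · subst hij; simp [hti]
            · simp [hij]
          have hst : (t ^^^ 2 ^ i) &&& t = t ^^^ 2 ^ i := pv_other_submask hpt
          have hsm : (t ^^^ 2 ^ i) &&& mask = t ^^^ 2 ^ i := pv_sub_trans hst h1
          have hslt : t ^^^ 2 ^ i < 2 ^ i := by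
            apply Nat.lt_pow_two_of_testBit
            intro j hj
            rcases eq_or_lt_of_le hj with rfl | hj'
            · simp [Nat.testBit_xor, hti]
            · rw [Nat.testBit_xor,
                Nat.testBit_lt_two_pow (lt_of_lt_of_le h2 (Nat.pow_le_pow_right (by omega) hj')),
                Nat.testBit_two_pow]
              simp
              omega
          refine ⟨t ^^^ 2 ^ i, (ih _).2 ⟨hsm, hslt⟩, ?_⟩
          rw [Nat.one_shiftLeft]
          apply Nat.eq_of_testBit_eq
          intro j
          simp only [Nat.testBit_or, Nat.testBit_xor, Nat.testBit_two_pow]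
          by_cases hij : i = j
          · subst hij; simp [hti]
          · simp [hij]
        · left
          apply (ih t).2
          refine ⟨h1, Nat.lt_pow_two_of_testBit t ?_⟩
          intro j hj
          rcases eq_or_lt_of_le hj with rfl | hj'
          · simpa using hti
          · exact Nat.testBit_lt_two_pow (lt_of_lt_of_le h2 (Nat.pow_le_pow_right (by omega) hj'))
    · rw [if_neg hbit]
      have hmb : mask.testBit i = false := by
        cases htb : mask.testBit i
        · rfl
        · exact absurd ((pv_bitB mask i).2 htb) hbit
      rw [ih t]
      constructor
      · rintro ⟨h1, h2⟩
        exact ⟨h1, lt_trans h2 (Nat.pow_lt_pow_succ (by omega))⟩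
      · rintro ⟨h1, h2⟩
        refine ⟨h1, Nat.lt_pow_two_of_testBit t ?_⟩
        intro j hj
        rcases eq_or_lt_of_le hj with rfl | hj'
        · cases htj : t.testBit i
          · rfl
          · rw [pv_sub_testBit h1 i htj] at hmb; cases hmb
        · exact Nat.testBit_lt_two_pow (lt_of_lt_of_le h2 (Nat.pow_le_pow_right (by omega) hj'))

theorem pvSubsB_mem (n mask : Nat) : ∀ t, t ∈ pvSubsB n mask ↔ (t &&& mask = t ∧ t < 2 ^ n) :=
  pvSubsB_mem_aux mask n

-- ---- solveB is fuel-irrelevant; pvG is its canonical value ----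
def pvG (lists : List (List Int)) (n m : Nat) : Int := pvSolveB lists n m m

theorem pv_solveB_fuel (lists : List (List Int)) (n : Nat) :
    ∀ (m f : Nat), m ≤ f → pvSolveB lists n f m = pvG lists n m := by
  intro m
  induction m using Nat.strong_induction_on with
  | _ m ih =>
    intro f hf
    unfold pvG
    rcases Nat.eq_zero_or_pos m with hm | hm
    · subst hm
      cases f with
      | zero => rfl
      | succ f => rw [pvSolveB_succ_eq]; simp [pvSolveB]
    · obtain ⟨f', rfl⟩ : ∃ f', f = f' + 1 := ⟨f - 1, by omega⟩
      obtain ⟨m', rfl⟩ : ∃ m', m = m' + 1 := ⟨m - 1, by omega⟩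
      set m := m' + 1 with hmdef
      rw [pvSolveB_succ_eq]
      conv_rhs => rw [hmdef, pvSolveB_succ_eq]
      by_cases hb : m &&& (m - 1) = 0
      · rw [if_pos hb, if_pos hb]
      · rw [if_neg hb, if_neg hb]
        congr 2
        apply List.map_congr_left
        intro t htm
        have htr := List.of_mem_filter htm
        have htg : ¬(t = 0 ∨ m ^^^ t ≤ t) := of_decide_eq_true htr
        have hts : t &&& m = t := (pvSubsB_mem n m t).1 (List.mem_of_mem_filter htm) |>.1
        have htle : t ≤ m := by
          conv_lhs => rw [← hts]
          exact Nat.and_le_right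
        have htlt : t < m := by
          rcases eq_or_lt_of_le htle with rfl | h
          · exfalso
            apply htg
            right
            rw [Nat.xor_self]
            omega
          · exact h
        have hol : m ^^^ t < m := pv_xor_lt hts (by omega)
        rw [ih t htlt f' (by omega), ih t htlt m' (by omega),
          ih (m ^^^ t) hol f' (by omega), ih (m ^^^ t) hol m' (by omega)]

-- the canonical cost of splitting `mask` into t and mask^^^t
def pvCost (lists : List (List Int)) (n mask t : Nat) : Int :=
  pvG lists n t + pvG lists n (mask ^^^ t) + (pvStatB lists n t).1 + (pvStatB lists n (mask ^^^ t)).1 +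
    |(pvStatB lists n t).2 - (pvStatB lists n (mask ^^^ t)).2|

-- ---- the fill loop builds exactly the pvStatB tables ----
theorem pv_stat_eq (lists : List (List Int)) (n mask : Nat) :
    pvStatB lists n mask =
      (((PySem.List.sorted (pvElemsA lists n mask) (fun x => x) false).length : Int),
        (PySem.List.sorted (pvElemsA lists n mask) (fun x => x) false).getD
          (((PySem.List.sorted (pvElemsA lists n mask) (fun x => x) false).length - 1)/2) 0) := by
  unfold pvStatB
  rw [pv_elems_eq]

theorem pvFillA_spec (lists : List (List Int)) (n size : Nat) :
    ∀ (d mask : Nat), size - mask = d → ∀ (len med : List Int), len.length = size →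
    med.length = size →
    (∀ j, 1 ≤ j → j < mask → len.getD j 0 = (pvStatB lists n j).1 ∧
      med.getD j 0 = (pvStatB lists n j).2) →
    ∀ j, 1 ≤ j → j < size →
      (pvFillA lists n size mask len med).1.getD j 0 = (pvStatB lists n j).1 ∧
      (pvFillA lists n size mask len med).2.getD j 0 = (pvStatB lists n j).2 := by
  intro d
  induction d using Nat.strong_induction_on with
  | _ d ihd =>
    intro mask hd len med hl hm hinv j h1 h2
    rw [pvFillA]
    by_cases hms : mask < size
    · rw [dif_pos hms]
      refine ihd (size - (mask+1)) (by omega) (mask+1) rfl _ _ (by simp [hl]) (by simp [hm]) ?_ j h1 h2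
      intro k hk1 hk2
      by_cases hkm : k = mask
      · subst hkm
        rw [pv_stat_eq]
        constructor
        · rw [List.getD_eq_getElem?_getD, List.getElem?_set_self (by omega)]
          rfl
        · rw [List.getD_eq_getElem?_getD, List.getElem?_set_self (by omega)]
          rfl
      · have hk3 : k < mask := by omega
        obtain ⟨e1, e2⟩ := hinv k hk1 hk3
        constructor
        · rw [List.getD_eq_getElem?_getD, List.getElem?_set_ne (by omega),
            ← List.getD_eq_getElem?_getD]
          exact e1
        · rw [List.getD_eq_getElem?_getD, List.getElem?_set_ne (by omega),
            ← List.getD_eq_getElem?_getD]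
          exact e2
    · rw [dif_neg hms]
      exact hinv j h1 (by omega)

-- ---- the dp loop computes pvG ----
theorem pvG_succ (lists : List (List Int)) (n mask : Nat) (h : 1 ≤ mask) :
    pvG lists n mask = pvSolveB lists n ((mask - 1) + 1) mask := by
  unfold pvG; congr 1; omega

theorem pv_dp_step (lists : List (List Int)) (n size : Nat) (len med dp : List Int)
    (mask : Nat) (hsize : size = 1 <<< n) (hm1 : 1 ≤ mask) (hms : mask < size)
    (hnb : mask &&& (mask - 1) ≠ 0)
    (hlen : ∀ j, 1 ≤ j → j < size → len.getD j 0 = (pvStatB lists n j).1)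
    (hmed : ∀ j, 1 ≤ j → j < size → med.getD j 0 = (pvStatB lists n j).2)
    (hdp : ∀ k, k < mask → dp.getD k 0 = pvG lists n k) :
    (pvInnerA dp len med mask ((mask - 1) &&& mask) none).getD 0 = pvG lists n mask := by
  have hm2n : mask < 2 ^ n := by rw [← Nat.one_shiftLeft, ← hsize]; exact hms
  have hs0m : ((mask - 1) &&& mask) &&& mask = (mask - 1) &&& mask := pv_submask_submask
  have hs0le : (mask - 1) &&& mask ≤ mask - 1 := Nat.and_le_left
  have hs0ne : (mask - 1) &&& mask ≠ 0 := by
    rw [Nat.and_comm]; exact hnb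
  -- both filtered index lists hold exactly the splits with 0 < t < mask ^^^ t
  have hsub_lt : ∀ t, t &&& mask = t → 0 < t → t < mask ^^^ t → t < mask := by
    intro t ha hb hc
    have : t ≤ mask := by
      conv_lhs => rw [← ha]
      exact Nat.and_le_right
    rcases eq_or_lt_of_le this with rfl | h
    · rw [Nat.xor_self] at hc; omega
    · exact h
  have hmemB : ∀ t, t ∈ (pvSubsB n mask).filter (fun t => decide ¬(t = 0 ∨ mask ^^^ t ≤ t)) ↔
      (t &&& mask = t ∧ 0 < t ∧ t < mask ^^^ t) := by
    intro t
    rw [List.mem_filter, decide_eq_true_eq, pvSubsB_mem]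
    constructor
    · rintro ⟨⟨ha, _⟩, hg⟩
      exact ⟨ha, by omega, by omega⟩
    · rintro ⟨ha, hb, hc⟩
      have hlt := hsub_lt t ha hb hc
      exact ⟨⟨ha, by omega⟩, by omega⟩
  have hmemA : ∀ t, t ∈ (pvSeq mask ((mask - 1) &&& mask)).filter
      (fun t => decide (t < mask ^^^ t)) ↔
      (t &&& mask = t ∧ 0 < t ∧ t < mask ^^^ t) := by
    intro t
    rw [List.mem_filter, decide_eq_true_eq]
    constructor
    · rintro ⟨hmem, hcond⟩
      obtain ⟨a, b, c⟩ := pvSeq_sound _ hs0m t hmem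
      exact ⟨a, b, hcond⟩
    · rintro ⟨a, b, hcond⟩
      have hlt := hsub_lt t a b hcond
      have : t ≤ (mask - 1) &&& mask := pv_K mask mask t (Nat.and_self mask) a hlt
      exact ⟨pvSeq_complete _ hs0m a b this, hcond⟩
  rw [pvInnerA_eq, pvG_succ lists n mask hm1, pvSolveB_succ_eq, if_neg hnb]
  have hAmap : ((pvSeq mask ((mask - 1) &&& mask)).filter (fun t => decide (t < mask ^^^ t))).map
      (fun t => dp.getD t 0 + dp.getD (mask ^^^ t) 0 + len.getD t 0 + len.getD (mask ^^^ t) 0 +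
        |med.getD t 0 - med.getD (mask ^^^ t) 0|) =
      ((pvSeq mask ((mask - 1) &&& mask)).filter (fun t => decide (t < mask ^^^ t))).map
        (pvCost lists n mask) := by
    apply List.map_congr_left
    intro t htm
    obtain ⟨ha, hb, hc⟩ := (hmemA t).1 htm
    have htlt := hsub_lt t ha hb hc
    have ho1 : mask ^^^ t < mask := pv_xor_lt ha hb
    have ho2 : 0 < mask ^^^ t := pv_other_pos htlt
    rw [hdp t htlt, hdp _ ho1, hlen t (by omega) (by omega), hlen _ (by omega) (by omega),
      hmed t (by omega) (by omega), hmed _ (by omega) (by omega)]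
    rfl
  have hBmap : ((pvSubsB n mask).filter (fun t => decide ¬(t = 0 ∨ mask ^^^ t ≤ t))).map
      (fun t => pvSolveB lists n (mask - 1) t + pvSolveB lists n (mask - 1) (mask ^^^ t) +
        (pvStatB lists n t).1 + (pvStatB lists n (mask ^^^ t)).1 +
        |(pvStatB lists n t).2 - (pvStatB lists n (mask ^^^ t)).2|) =
      ((pvSubsB n mask).filter (fun t => decide ¬(t = 0 ∨ mask ^^^ t ≤ t))).map
        (pvCost lists n mask) := by
    apply List.map_congr_left
    intro t htm
    obtain ⟨ha, hb, hc⟩ := (hmemB t).1 htm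
    have htlt := hsub_lt t ha hb hc
    have ho1 : mask ^^^ t < mask := pv_xor_lt ha hb
    rw [pv_solveB_fuel lists n t (mask - 1) (by omega),
      pv_solveB_fuel lists n (mask ^^^ t) (mask - 1) (by omega)]
    rfl
  rw [hAmap, hBmap]
  congr 1
  -- a common witness: the smaller of (mask-1)&&&mask and its complement
  have hwit : ∃ u, u &&& mask = u ∧ 0 < u ∧ u < mask ^^^ u := by
    set s0 := (mask - 1) &&& mask with hs0
    have hs0lt : s0 < mask := by omega
    have hne := pv_ne_other hs0m (by omega)
    by_cases hlt : s0 < mask ^^^ s0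
    · exact ⟨s0, hs0m, by omega, hlt⟩
    · refine ⟨mask ^^^ s0, pv_other_submask hs0m, pv_other_pos hs0lt, ?_⟩
      rw [pv_xor_xor]
      omega
  obtain ⟨u, hu1, hu2, hu3⟩ := hwit
  apply pv_omin_eq
  · exact List.ne_nil_of_mem ((hmemA u).2 ⟨hu1, hu2, hu3⟩)
  · exact List.ne_nil_of_mem ((hmemB u).2 ⟨hu1, hu2, hu3⟩)
  · intro t htm
    exact ⟨t, (hmemB t).2 ((hmemA t).1 htm), rfl⟩
  · intro t htm
    exact ⟨t, (hmemA t).2 ((hmemB t).1 htm), rfl⟩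

theorem pvDpA_spec (lists : List (List Int)) (n size : Nat) (len med : List Int)
    (hsize : size = 1 <<< n)
    (hlen : ∀ j, 1 ≤ j → j < size → len.getD j 0 = (pvStatB lists n j).1)
    (hmed : ∀ j, 1 ≤ j → j < size → med.getD j 0 = (pvStatB lists n j).2) :
    ∀ (d mask : Nat), size - mask = d → ∀ (dp : List Int), 1 ≤ mask → dp.length = size →
    (∀ k, k < mask → dp.getD k 0 = pvG lists n k) →
    ∀ k, k < size → (pvDpA len med dp mask size).getD k 0 = pvG lists n k := by
  intro d
  induction d using Nat.strong_induction_on with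
  | _ d ihd =>
    intro mask hd dp hm1 hlength hinv k hk
    rw [pvDpA]
    by_cases hms : mask < size
    · rw [dif_pos hms]
      have hstep : ∀ v : Int, v = pvG lists n mask →
          ∀ k', k' < mask + 1 → (dp.set mask v).getD k' 0 = pvG lists n k' := by
        intro v hv k' hk'
        by_cases hkm : k' = mask
        · subst hkm
          rw [List.getD_eq_getElem?_getD, List.getElem?_set_self (by omega), Option.getD_some, hv]
        · rw [List.getD_eq_getElem?_getD, List.getElem?_set_ne (by omega),
            ← List.getD_eq_getElem?_getD]
          exact hinv k' (by omega)
      by_cases hb : mask &&& (mask - 1) = 0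
      · rw [if_pos hb]
        refine ihd (size - (mask + 1)) (by omega) (mask + 1) rfl _ (by omega) (by simp [hlength])
          (hstep 0 ?_) k hk
        rw [pvG_succ lists n mask hm1, pvSolveB_succ_eq, if_pos hb]
      · rw [if_neg hb]
        show (pvDpA len med (dp.set mask _) (mask + 1) size).getD k 0 = _
        refine ihd (size - (mask + 1)) (by omega) (mask + 1) rfl _ (by omega) (by simp [hlength])
          (hstep _ ?_) k hk
        exact pv_dp_step lists n size len med dp mask hsize hm1 hms hb hlen hmed hinv
    · rw [dif_neg hms]
      exact hinv k (by omega)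

theorem pv_shift_pos (n : Nat) : 1 ≤ 1 <<< n := by
  rw [Nat.one_shiftLeft]
  exact Nat.two_pow_pos n

-- ===== VERDICT (by name: the statement is the Claim_ definition above) =====
theorem minMergeCost_spec : Claim_equal_minMergeCost := by
  intro lists _hdom _hpre
  unfold Spec_minMergeCost minMergeCost minMergeCost_alt
  have hpos := pv_shift_pos lists.length
  show (pvDpA (pvFillA lists lists.length (1 <<< lists.length) 1
      (List.replicate (1 <<< lists.length) 0) (List.replicate (1 <<< lists.length) 0)).1
      (pvFillA lists lists.length (1 <<< lists.length) 1
      (List.replicate (1 <<< lists.length) 0) (List.replicate (1 <<< lists.length) 0)).2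
      (List.replicate (1 <<< lists.length) 0) 1 (1 <<< lists.length)).getD
      ((1 <<< lists.length) - 1) 0 =
    pvSolveB lists lists.length ((1 <<< lists.length) - 1) ((1 <<< lists.length) - 1)
  by_cases h1 : 1 <<< lists.length = 1
  · rw [h1]
    rw [pvDpA]
    norm_num
    rfl
  · have hlt : (1 <<< lists.length) - 1 < 1 <<< lists.length := by omega
    have hfill := pvFillA_spec lists lists.length (1 <<< lists.length)
      ((1 <<< lists.length) - 1) 1 rfl (List.replicate (1 <<< lists.length) 0)
      (List.replicate (1 <<< lists.length) 0) (by simp) (by simp)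
      (by intro j hj1 hj2; omega)
    have hdp := pvDpA_spec lists lists.length (1 <<< lists.length) _ _ rfl
      (fun j a b => (hfill j a b).1) (fun j a b => (hfill j a b).2)
      ((1 <<< lists.length) - 1) 1 rfl (List.replicate (1 <<< lists.length) 0)
      (by omega) (by simp)
      (by
        intro k hkm
        have hk0 : k = 0 := by omega
        subst hk0
        rw [List.getD_eq_getElem?_getD, List.getElem?_replicate_of_lt (by omega)]
        rfl)
      ((1 <<< lists.length) - 1) hlt
    exact hdp
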